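-- pv_equiv track=rewrite | github.com/beironf/jeppesen | create_forbid_sequences.py | getUsedSegsBeforeNode
-- ===== SOURCE A (Python) =====
-- def getUsedSegsBeforeNode(node, route):
--     used_segs = []
--     for sg in route:
--         if sg['to'] == node:
--             used_segs.append(sg)
--             return used_segs
--         else:
--             used_segs.append(sg)
--     return used_segs
-- ===== SOURCE B (Python) =====
-- def getUsedSegsBeforeNode(node, route):
--     idx = next((i for i, sg in enumerate(route) if sg.get('to') == node), None)
--     return route[:] if idx is None else route[:idx + 1]
-- ===== Notes on version B (the rewrite author's own statement) =====
-- stated objective: simpler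
-- what changed: B first locates the index of the matching segment with a generator over enumerate, then materializes the prefix by one slice, instead of A's append-inside-the-scan accumulator.
import Mathlib
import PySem

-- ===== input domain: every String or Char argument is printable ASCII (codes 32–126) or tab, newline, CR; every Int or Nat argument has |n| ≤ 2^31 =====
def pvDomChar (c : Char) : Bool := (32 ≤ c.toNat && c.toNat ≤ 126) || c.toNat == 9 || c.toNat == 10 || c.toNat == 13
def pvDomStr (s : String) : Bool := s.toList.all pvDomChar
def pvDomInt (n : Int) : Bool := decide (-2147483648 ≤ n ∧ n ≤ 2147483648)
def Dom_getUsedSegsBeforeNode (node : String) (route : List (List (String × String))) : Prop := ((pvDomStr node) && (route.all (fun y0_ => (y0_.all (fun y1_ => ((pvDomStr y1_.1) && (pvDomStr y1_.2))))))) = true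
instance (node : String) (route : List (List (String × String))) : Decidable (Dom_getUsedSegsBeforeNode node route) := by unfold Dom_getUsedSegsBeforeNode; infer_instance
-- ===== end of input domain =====

-- B separates finding the cut index from materializing the prefix (find-then-slice) instead of A's
-- append-inside-the-scan accumulator; objective: simpler decomposition (same O(n) cost).


-- ===== PORT A =====
-- sg['to'] : first-match lookup; none = KeyError (excluded by Pre_; the port returns the
-- accumulator there, a value never claimed about).
def pvLookTo (sg : List (String × String)) : Option String :=
  PySem.Dict.get? (PySem.Dict.mk sg) "to"

def pvGoA (node : String) (acc : List (List (String × String))) :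
    List (List (String × String)) → List (List (String × String))
  | [] => acc
  | sg :: rest =>
    match pvLookTo sg with
    | none => acc  -- KeyError in Python: outside Pre_
    | some v => if v == node then acc ++ [sg] else pvGoA node (acc ++ [sg]) rest

def getUsedSegsBeforeNode (node : String) (route : List (List (String × String))) : List (List (String × String)) :=
  pvGoA node [] route

-- ===== PORT B =====
-- idx = next((i for i, sg in enumerate(route) if sg.get('to') == node), None);
-- route[:] if idx is None else route[:idx+1]  (idx ≥ 0, so the slice is List.take (idx+1))
def getUsedSegsBeforeNode_alt (node : String) (route : List (List (String × String))) : List (List (String × String)) :=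
  match route.findIdx? (fun sg => pvLookTo sg == some node) with
  | none => route
  | some i => route.take (i + 1)

-- ===== PRECONDITION & SPEC =====
-- Pre_ excludes exactly the inputs where A raises KeyError: some segment scanned before any
-- segment whose 'to' equals node has no 'to' key.
def Pre_getUsedSegsBeforeNode (node : String) (route : List (List (String × String))) : Prop :=
  ∀ sg ∈ route.takeWhile (fun sg => !(pvLookTo sg == some node)), (pvLookTo sg).isSome = true
instance (node : String) (route : List (List (String × String))) : Decidable (Pre_getUsedSegsBeforeNode node route) := by unfold Pre_getUsedSegsBeforeNode; infer_instance

def pvWitness_getUsedSegsBeforeNode : String × (List (List (String × String))) :=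
  ("B", [[("to", "A")], [("to", "B")], [("x", "C")]])

def Spec_getUsedSegsBeforeNode (node : String) (route : List (List (String × String))) (out : List (List (String × String))) : Prop := out = getUsedSegsBeforeNode_alt node route
instance (node : String) (route : List (List (String × String))) (out : List (List (String × String))) : Decidable (Spec_getUsedSegsBeforeNode node route out) := by unfold Spec_getUsedSegsBeforeNode; infer_instance

-- ===== CLAIM (what is proved, stated in full; the proofs are below) =====
def Claim_equal_getUsedSegsBeforeNode : Prop := ∀ (node : String) (route : List (List (String × String))), Dom_getUsedSegsBeforeNode node route → Pre_getUsedSegsBeforeNode node route → Spec_getUsedSegsBeforeNode node route (getUsedSegsBeforeNode node route)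

-- ===== LEMMAS AND PROOFS =====

-- loop invariant: A's scan with accumulator acc equals acc ++ B's find-then-slice prefix
theorem pvGoA_eq (node : String) (route : List (List (String × String)))
    (hp : Pre_getUsedSegsBeforeNode node route) (acc : List (List (String × String))) :
    pvGoA node acc route = acc ++ getUsedSegsBeforeNode_alt node route := by
  induction route generalizing acc with
  | nil => simp [pvGoA, getUsedSegsBeforeNode_alt]
  | cons sg rest ih =>
    by_cases h : pvLookTo sg == some node
    · have hv : pvLookTo sg = some node := by simpa using h
      simp [pvGoA, hv, getUsedSegsBeforeNode_alt, List.findIdx?_cons]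
    · have hne : pvLookTo sg ≠ some node := by simpa using h
      have hmem : sg ∈ (sg :: rest).takeWhile (fun sg => !(pvLookTo sg == some node)) := by
        simp [h]
      obtain ⟨v, hv⟩ := Option.isSome_iff_exists.mp (hp sg hmem)
      have hvne : (v == node) = false := by
        by_contra hb
        have hvb : v = node := by
          cases hvb : (v == node) with
          | false => exact absurd hvb hb
          | true => exact beq_iff_eq.mp hvb
        exact hne (by simp [hv, hvb])
      have hrest : Pre_getUsedSegsBeforeNode node rest := by
        intro s hs
        refine hp s ?_
        simp only [List.takeWhile_cons, h]
        simpa using List.mem_cons_of_mem sg hs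
      have halt : getUsedSegsBeforeNode_alt node (sg :: rest)
          = sg :: getUsedSegsBeforeNode_alt node rest := by
        simp only [getUsedSegsBeforeNode_alt, List.findIdx?_cons, h]
        cases hfi : rest.findIdx? (fun sg => pvLookTo sg == some node) with
        | none => simp
        | some i => simp [List.take_succ_cons]
      simp only [pvGoA, hv, hvne, Bool.false_eq_true, if_false]
      rw [ih hrest (acc ++ [sg]), halt]
      simp

-- ===== VERDICT (by name: the statement is the Claim_ definition above) =====
theorem getUsedSegsBeforeNode_spec : Claim_equal_getUsedSegsBeforeNode := by
  intro node route _ hp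
  unfold Spec_getUsedSegsBeforeNode getUsedSegsBeforeNode
  simpa using pvGoA_eq node route hp []
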